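-- pv_equiv track=rewrite | github.com/linhdvu14/cp-sols | sols/CodeForces/1820_d2/B_JoJo_s_Incredible_Adventures.py | solve
-- ===== SOURCE A (Python) =====
-- def solve(S):
--     N = len(S)
--     if '0' not in S: return N ** 2
--
--     S *= 2
--     M = len(S)
--
--     res = i = 0
--     while i < M:
--         while i < M and S[i] == '0': i += 1
--         j = i
--         while j < M and S[j] == '1': j += 1
--         d = min(j - i, M) + 1
--         res = max(res, (d // 2) * (d - d // 2))
--         i = j
--
--     return res
-- ===== SOURCE B (Python) =====
-- def solve(S):
--     n = len(S)
--     if '0' not in S: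
--         return n * n
--     # split on '0': the pieces are exactly the maximal runs of '1's (possibly empty);
--     # the circular wrap-around run is the last piece joined with the first one.
--     runs = [len(p) for p in S.split('0')]
--     best = max(max(runs), runs[0] + runs[-1])
--     d = best + 1
--     return (d // 2) * (d - d // 2)
-- ===== Notes on version B (the rewrite author's own statement) =====
-- stated objective: simpler
-- what changed: B drops A's string-doubling and index-scanning while-loops entirely: it splits the original string on '0' (the pieces are exactly the maximal runs of '1's), takes the max piece length and the wrap-around sum first+last piece, and applies the area formula once.
import Mathlib
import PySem

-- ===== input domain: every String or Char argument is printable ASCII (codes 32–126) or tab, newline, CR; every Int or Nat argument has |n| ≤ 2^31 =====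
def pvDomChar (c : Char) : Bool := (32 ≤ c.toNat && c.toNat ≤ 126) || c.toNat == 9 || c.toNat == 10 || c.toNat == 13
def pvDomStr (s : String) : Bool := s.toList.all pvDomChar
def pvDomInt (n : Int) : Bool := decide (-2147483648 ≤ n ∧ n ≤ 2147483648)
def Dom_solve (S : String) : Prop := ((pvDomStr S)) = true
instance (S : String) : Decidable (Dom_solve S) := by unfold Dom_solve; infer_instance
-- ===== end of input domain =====

-- B replaces A's scan over the doubled string by splitting the original string on '0'
-- (the pieces are the maximal runs of '1's; wrap-around run = last piece + first piece): simpler, one pass, no doubling.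

-- ===== PORT A =====
-- `while i < M and S[i] == c: i += 1` (both inner loops of A)
def pvScan (c : Char) (L : List Char) (i : Nat) : Nat :=
  if h : i < L.length then
    if L[i] = c then pvScan c L (i + 1) else i
  else i
termination_by L.length - i
decreasing_by omega

-- A's outer `while i < M` loop; fuel M+1 only guards termination (inside Pre_solve each
-- iteration strictly advances i, so the fuel is never exhausted there).
def pvLoopA (L : List Char) : Nat → Nat → Nat → Nat
  | 0, _i, res => res
  | fuel + 1, i, res =>
    if i < L.length then
      let i' := pvScan '0' L i
      let j := pvScan '1' L i'
      let d := min (j - i') L.length + 1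
      pvLoopA L fuel j (max res (d / 2 * (d - d / 2)))
    else res

def solve (S : String) : Int :=
  let N : Int := PySem.Str.len S
  if !(PySem.Str.isIn "0" S) then N ^ 2          -- if '0' not in S: return N ** 2
  else
    let L := S.toList ++ S.toList                -- S *= 2
    (pvLoopA L (L.length + 1) 0 0 : Int)         -- res = i = 0; while i < M: ...

-- ===== PORT B =====
def solve_alt (S : String) : Int :=
  let n : Int := PySem.Str.len S
  if !(PySem.Str.isIn "0" S) then n * n          -- if '0' not in S: return n * n
  else
    -- runs = [len(p) for p in S.split('0')]
    let runs : List Int := (PySem.Chars.splitOn S.toList "0".toList).map (fun p => (p.length : Int))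
    -- max(runs): runs is nonempty (split always yields at least one piece), so the none branch is unreachable
    let m : Int := match PySem.List.max? runs (fun x => x) with | some m => m | none => 0
    let best := max m (PySem.List.pyGetD runs 0 0 + PySem.List.pyGetD runs (-1) 0)
    let d := best + 1
    PySem.Int.floordiv d 2 * (d - PySem.Int.floordiv d 2)

-- ===== PRECONDITION & SPEC =====
-- Pre_ excludes strings that contain '0' together with some character other than '0'/'1':
-- on those A's outer loop never advances i and A loops forever (no value is returned).
def Pre_solve (S : String) : Prop :=
  '0' ∈ S.toList → (S.toList.all (fun c => c == '0' || c == '1')) = true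
instance (S : String) : Decidable (Pre_solve S) := by unfold Pre_solve; infer_instance

def pvWitness_solve : String := "0110"

def Spec_solve (S : String) (out : Int) : Prop := out = solve_alt S
instance (S : String) (out : Int) : Decidable (Spec_solve S out) := by unfold Spec_solve; infer_instance

-- ===== CLAIM (what is proved, stated in full; the proofs are below) =====
def Claim_equal_solve : Prop := ∀ (S : String), Dom_solve S → Pre_solve S → Spec_solve S (solve S)

-- ===== LEMMAS AND PROOFS =====

-- spec machinery: the classic one-pass max-run-of-'1's fold
def pvStep (p : Nat × Nat) (ch : Char) : Nat × Nat :=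
  if ch = '1' then (p.1 + 1, max p.2 (p.1 + 1)) else (0, p.2)

def pvMaxRun (l : List Char) : Nat := (l.foldl pvStep (0, 0)).2

def pvMaxLens (qs : List (List Char)) : Nat := qs.foldl (fun a q => max a q.length) 0

-- reference splitter: Python's s.split(c) for a single-char separator
def pvSplit (c : Char) : List Char → List (List Char)
  | [] => [[]]
  | d :: t => if d = c then [] :: pvSplit c t else (pvSplit c t).modifyHead (d :: ·)

-- the area formula applied to a run of length r
def pvF (r : Nat) : Nat := (r + 1) / 2 * ((r + 1) - (r + 1) / 2)

lemma pvF_mono {a b : Nat} (h : a ≤ b) : pvF a ≤ pvF b := by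
  unfold pvF; exact Nat.mul_le_mul (by omega) (by omega)

lemma pvF_max (a b : Nat) : pvF (max a b) = max (pvF a) (pvF b) := by
  rcases Nat.le_total a b with h | h
  · rw [Nat.max_eq_right h, Nat.max_eq_right (pvF_mono h)]
  · rw [Nat.max_eq_left h, Nat.max_eq_left (pvF_mono h)]

lemma pv_snd_foldl (l : List Char) : ∀ c b, (l.foldl pvStep (c, b)).2 = max b ((l.foldl pvStep (c, 0)).2) := by
  induction l with
  | nil => intro c b; simp
  | cons x t ih =>
    intro c b
    simp only [List.foldl_cons]
    by_cases hx : x = '1'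
    · rw [show pvStep (c, b) x = (c+1, max b (c+1)) by simp [pvStep, hx],
          show pvStep (c, 0) x = (c+1, max 0 (c+1)) by simp [pvStep, hx],
          ih (c+1) (max b (c+1)), ih (c+1) (max 0 (c+1))]
      omega
    · rw [show pvStep (c, b) x = (0, b) by simp [pvStep, hx],
          show pvStep (c, 0) x = (0, 0) by simp [pvStep, hx],
          ih 0 b]

lemma pv_foldl_ones (k : Nat) : ∀ c b, (List.replicate k '1').foldl pvStep (c, max b c) = (c + k, max b (c + k)) := by
  induction k with
  | zero => intro c b; simp
  | succ n ih =>
    intro c b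
    simp only [List.replicate_succ, List.foldl_cons]
    rw [show pvStep (c, max b c) '1' = (c+1, max (max b c) (c+1)) by simp [pvStep]]
    have h1 : max (max b c) (c + 1) = max b (c + 1) := by omega
    have h2 : (c + 1) + n = c + (n + 1) := by omega
    rw [h1, ih (c + 1) b, h2]

lemma pv_foldl_ones0 (k : Nat) : (List.replicate k '1').foldl pvStep (0, 0) = (k, k) := by
  have := pv_foldl_ones k 0 0
  simpa using this

lemma pvMaxRun_nil : pvMaxRun [] = 0 := rfl

lemma pvMaxRun_cons_ne {c : Char} (hc : c ≠ '1') (l : List Char) : pvMaxRun (c :: l) = pvMaxRun l := by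
  simp [pvMaxRun, pvStep, hc]

lemma pvMaxRun_not1_append {t : List Char} (ht : ∀ x ∈ t, x ≠ '1') (l : List Char) :
    pvMaxRun (t ++ l) = pvMaxRun l := by
  induction t with
  | nil => simp
  | cons x s ih =>
    simp only [List.cons_append]
    rw [pvMaxRun_cons_ne (ht x (by simp)), ih (fun y hy => ht y (by simp [hy]))]

lemma pvMaxRun_ones_append (k : Nat) {l : List Char}
    (hl : l = [] ∨ ∃ c t, l = c :: t ∧ c ≠ '1') :
    pvMaxRun (List.replicate k '1' ++ l) = max k (pvMaxRun l) := by
  unfold pvMaxRun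
  rw [List.foldl_append, pv_foldl_ones0 k]
  rcases hl with rfl | ⟨c, t, rfl, hc⟩
  · simp
  · simp only [List.foldl_cons]
    rw [show pvStep (k, k) c = (0, k) by simp [pvStep, hc], pv_snd_foldl t 0 k,
        show pvStep (0, 0) c = (0, 0) by simp [pvStep, hc]]

-- pvScan characterisation
lemma pvScan_eq (c : Char) (L : List Char) : ∀ i, pvScan c L i = i + ((L.drop i).takeWhile (· = c)).length := by
  intro i
  induction hn : L.length - i using Nat.strong_induction_on generalizing i with
  | _ n ih =>
    rw [pvScan]
    split
    · next h =>
      have hdrop : L.drop i = L[i] :: L.drop (i + 1) := List.drop_eq_getElem_cons h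
      by_cases hc : L[i] = c
      · rw [if_pos hc, ih (L.length - (i+1)) (by omega) (i+1) rfl, hdrop]
        simp [List.takeWhile_cons, hc]
        omega
      · rw [if_neg hc, hdrop]
        simp [List.takeWhile_cons, hc]
    · next h =>
      rw [List.drop_eq_nil_of_le (by omega)]
      simp

lemma pv_drop_takeWhile {α : Type} (p : α → Bool) (l : List α) :
    l.drop ((l.takeWhile p).length) = l.dropWhile p := by
  induction l with
  | nil => simp
  | cons x t ih =>
    by_cases hx : p x
    · simp [List.takeWhile_cons, List.dropWhile_cons, hx, ih]
    · simp [List.takeWhile_cons, List.dropWhile_cons, hx]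

lemma pv_dropWhile_shape {α : Type} (p : α → Bool) (l : List α) :
    l.dropWhile p = [] ∨ ∃ c t, l.dropWhile p = c :: t ∧ ¬ p c := by
  induction l with
  | nil => simp
  | cons x s ih =>
    by_cases hx : p x
    · simpa [List.dropWhile_cons, hx] using ih
    · exact Or.inr ⟨x, s, by simp [List.dropWhile_cons, hx], hx⟩

-- the main loop of A computes the area formula of the longest run of '1's of the unscanned suffix
lemma pvLoopA_eq (L : List Char) (hbin : ∀ x ∈ L, x = '0' ∨ x = '1') :
    ∀ fuel i res, L.length - i < fuel →
      pvLoopA L fuel i res = max res (pvF (pvMaxRun (L.drop i))) := by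
  intro fuel
  induction fuel with
  | zero => intro i res h; omega
  | succ fuel ih =>
    intro i res hfuel
    rw [pvLoopA]
    split
    · next hi =>
      set i' := pvScan '0' L i with hi'
      set j := pvScan '1' L i' with hj
      show pvLoopA L fuel j (max res ((min (j - i') L.length + 1) / 2 *
          ((min (j - i') L.length + 1) - (min (j - i') L.length + 1) / 2))) =
        max res (pvF (pvMaxRun (L.drop i)))
      set t0 := (L.drop i).takeWhile (· = '0') with ht0
      set D0 := (L.drop i).dropWhile (· = '0') with hD0
      have hi'eq : i' = i + t0.length := pvScan_eq '0' L i
      have hdropi' : L.drop i' = D0 := by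
        rw [hi'eq, ← List.drop_drop, pv_drop_takeWhile]
      have hjeq : j = i' + (D0.takeWhile (· = '1')).length := by
        rw [hj, pvScan_eq '1' L i', hdropi']
      set t1 := D0.takeWhile (· = '1') with ht1
      have hdropj : L.drop j = D0.dropWhile (· = '1') := by
        rw [hjeq, ← List.drop_drop, hdropi', pv_drop_takeWhile]
      have ht0len : t0.length ≤ (L.drop i).length := by
        rw [ht0]; exact (List.takeWhile_prefix _).length_le
      have hD0len : D0.length ≤ (L.drop i).length := by
        rw [hD0]; exact List.length_dropWhile_le _ _
      have ht1len : t1.length ≤ D0.length := by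
        rw [ht1]; exact (List.takeWhile_prefix _).length_le
      have hlen : (L.drop i).length = L.length - i := List.length_drop
      have hsum : t0.length + D0.length = (L.drop i).length := by
        rw [ht0, hD0, ← List.length_append, List.takeWhile_append_dropWhile]
      -- min (j - i') L.length = j - i', i.e. d - 1 = t1.length
      have hji' : j - i' = t1.length := by omega
      have hmin : min (j - i') L.length = t1.length := by
        rw [hji']; omega
      -- decomposition of the suffix
      have hdec : L.drop i = t0 ++ (t1 ++ D0.dropWhile (· = '1')) := by
        conv_rhs => rw [ht1, List.takeWhile_append_dropWhile]
        rw [ht0, hD0, List.takeWhile_append_dropWhile]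
      have ht0all : ∀ x ∈ t0, x ≠ '1' := by
        intro x hx
        have h := List.mem_takeWhile_imp hx
        simp at h; simp [h]
      have ht1all : ∀ x ∈ t1, x = '1' := by
        intro x hx
        have := List.mem_takeWhile_imp hx
        simpa using this
      have ht1rep : t1 = List.replicate t1.length '1' := List.eq_replicate_of_mem ht1all
      have hshape := pv_dropWhile_shape (· = '1') D0
      have hMR : pvMaxRun (L.drop i) = max t1.length (pvMaxRun (L.drop j)) := by
        rw [hdec, pvMaxRun_not1_append ht0all, hdropj]
        conv_lhs => rw [ht1rep]
        apply pvMaxRun_ones_append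
        rcases hshape with h | ⟨c, t, hct, hc⟩
        · left; exact h
        · right; exact ⟨c, t, hct, by simpa using hc⟩
      -- fuel for the recursive call
      have hjlb : L.length - j < fuel := by
        have hts : t1.length + (D0.dropWhile (· = '1')).length = D0.length := by
          rw [ht1, ← List.length_append, List.takeWhile_append_dropWhile]
        rcases hshape with hD0nil | ⟨c, t, hct, hc⟩
        · -- the suffix after the zeros is all ones: then j = L.length
          have hd0l : (D0.dropWhile (· = '1')).length = 0 := by rw [hD0nil]; rfl
          omega
        · by_cases hD0e : D0 = []
          · -- the whole suffix is zeros: then j = L.length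
            have ht1e : t1.length = 0 := by rw [ht1, hD0e]; rfl
            have hD0l : D0.length = 0 := by rw [hD0e]; rfl
            omega
          · -- D0 = d :: _, d ≠ '0' (dropWhile), d binary ⇒ d = '1' ⇒ t1.length ≥ 1
            obtain ⟨d, t', hD0c⟩ := List.exists_cons_of_ne_nil hD0e
            have hd0 : ¬ (d = '0') := by
              rcases pv_dropWhile_shape (· = '0') (L.drop i) with h | ⟨e, u, heu, he⟩
              · rw [← hD0] at h; simp [h] at hD0c
              · rw [← hD0] at heu; rw [hD0c] at heu
                injection heu with h1 _
                subst h1; simpa using he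
            have hdmem : d ∈ L := by
              have : d ∈ L.drop i := by
                rw [hdec, hD0c]
                rw [hD0c] at ht1
                simp [ht1, List.takeWhile_cons]
                by_cases hd1 : d = '1' <;> simp [hd1]
              exact List.mem_of_mem_drop this
            have hd1 : d = '1' := (hbin d hdmem).resolve_left hd0
            have ht1pos : 0 < t1.length := by
              rw [ht1, hD0c, List.takeWhile_cons, if_pos (by simp [hd1])]
              simp
            omega
      rw [ih j (max res ((min (j - i') L.length + 1) / 2 * ((min (j - i') L.length + 1) - (min (j - i') L.length + 1) / 2))) hjlb]
      rw [hMR, pvF_max, hmin]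
      have : (t1.length + 1) / 2 * ((t1.length + 1) - (t1.length + 1) / 2) = pvF t1.length := rfl
      rw [this]
      omega
    · next hi =>
      rw [List.drop_eq_nil_of_le (by omega)]
      simp [pvMaxRun_nil, pvF]

-- ===== pvSplit facts =====
lemma pvSplit_ne_nil (c : Char) (l : List Char) : pvSplit c l ≠ [] := by
  induction l with
  | nil => simp [pvSplit]
  | cons d t ih =>
    by_cases hd : d = c <;> simp [pvSplit, hd]
    · intro h
      have hh := congrArg List.length h
      simp at hh
      exact ih hh

lemma pv_go_eq (c : Char) :
    ∀ l fuel (cur : List Char) (acc : List (List Char)), l.length < fuel →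
      PySem.Chars.splitOn.go [c] fuel l cur acc =
        acc.reverse ++ (pvSplit c l).modifyHead (cur.reverse ++ ·) := by
  intro l
  induction l with
  | nil =>
    intro fuel cur acc h
    match fuel, h with
    | fuel + 1, _ =>
      rw [PySem.Chars.splitOn.go.eq_def]
      simp [pvSplit]
  | cons d t ih =>
    intro fuel cur acc h
    match fuel, h with
    | fuel + 1, h =>
      rw [PySem.Chars.splitOn.go.eq_def]
      show (if [c].isPrefixOf (d :: t) = true
          then PySem.Chars.splitOn.go [c] fuel (List.drop [c].length (d :: t)) [] (cur.reverse :: acc)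
          else PySem.Chars.splitOn.go [c] fuel t (d :: cur) acc) =
        acc.reverse ++ (pvSplit c (d :: t)).modifyHead (cur.reverse ++ ·)
      by_cases hd : d = c
      · subst hd
        rw [if_pos (by simp [List.isPrefixOf])]
        have hdrop : List.drop [d].length (d :: t) = t := rfl
        rw [hdrop, ih fuel [] (cur.reverse :: acc) (by simpa using h)]
        obtain ⟨p, ps, hp⟩ := List.exists_cons_of_ne_nil (pvSplit_ne_nil d t)
        simp [pvSplit, hp, List.modifyHead]
      · rw [if_neg (by
          simp only [List.isPrefixOf, Bool.and_true, beq_iff_eq]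
          exact fun h' => hd h'.symm)]
        rw [ih fuel (d :: cur) acc (by simpa using h)]
        obtain ⟨q, qs, hq⟩ := List.exists_cons_of_ne_nil (pvSplit_ne_nil c t)
        simp [pvSplit, hd, hq, List.modifyHead]

lemma pv_splitOn_eq (c : Char) (l : List Char) : PySem.Chars.splitOn l [c] = pvSplit c l := by
  unfold PySem.Chars.splitOn
  rw [pv_go_eq c l (l.length + 1) [] [] (by omega)]
  obtain ⟨q, qs, hq⟩ := List.exists_cons_of_ne_nil (pvSplit_ne_nil c l)
  simp [hq, List.modifyHead]

lemma pvSplit_mem_sub (c : Char) (l : List Char) : ∀ q ∈ pvSplit c l, ∀ x ∈ q, x ∈ l ∧ x ≠ c := by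
  induction l with
  | nil => intro q hq x hx; simp [pvSplit] at hq; simp [hq] at hx
  | cons d t ih =>
    intro q hq x hx
    by_cases hd : d = c
    · simp [pvSplit, hd] at hq
      rcases hq with hq | hq
      · simp [hq] at hx
      · have := ih q hq x hx; exact ⟨by simp [this.1], this.2⟩
    · obtain ⟨p, ps, hp⟩ := List.exists_cons_of_ne_nil (pvSplit_ne_nil c t)
      simp [pvSplit, hd, hp, List.modifyHead] at hq
      rcases hq with hq | hq
      · subst hq
        rcases List.mem_cons.mp hx with rfl | hx'
        · exact ⟨by simp, hd⟩
        · have := ih p (by simp [hp]) x hx'; exact ⟨by simp [this.1], this.2⟩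
      · have := ih q (by simp [hp, hq]) x hx; exact ⟨by simp [this.1], this.2⟩

lemma pv_ic_cons (s q : List Char) {qs : List (List Char)} (h : qs ≠ []) :
    List.intercalate s (q :: qs) = q ++ s ++ List.intercalate s qs := by
  obtain ⟨r, rs, rfl⟩ := List.exists_cons_of_ne_nil h
  simp [List.intercalate]

lemma pv_ic_append (s : List Char) {X Y : List (List Char)} (hX : X ≠ []) (hY : Y ≠ []) :
    List.intercalate s (X ++ Y) = List.intercalate s X ++ s ++ List.intercalate s Y := by
  induction X with
  | nil => simp at hX
  | cons q X ih =>
    by_cases hXe : X = []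
    · subst hXe
      rw [List.singleton_append, pv_ic_cons s q hY]
      simp [List.intercalate]
    · rw [List.cons_append, pv_ic_cons s q (by simp [hXe]), pv_ic_cons s q hXe, ih hXe]
      simp [List.append_assoc]

lemma pv_intercalate_pvSplit (c : Char) (l : List Char) :
    List.intercalate [c] (pvSplit c l) = l := by
  induction l with
  | nil => simp [pvSplit, List.intercalate]
  | cons d t ih =>
    by_cases hd : d = c
    · subst hd
      rw [pvSplit, if_pos rfl, pv_ic_cons [d] [] (pvSplit_ne_nil d t), ih]
      simp
    · obtain ⟨q, qs, hq⟩ := List.exists_cons_of_ne_nil (pvSplit_ne_nil c t)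
      rw [pvSplit, if_neg hd, hq, List.modifyHead]
      by_cases hqs : qs = []
      · subst hqs
        simp [List.intercalate] at ih ⊢
        simp [hq, List.intercalate] at ih
        simp [ih]
      · rw [pv_ic_cons [c] _ hqs]
        rw [hq, pv_ic_cons [c] _ hqs] at ih
        simp [ih]

lemma pvSplit_two_of_mem {c : Char} {l : List Char} (h : c ∈ l) :
    ∃ q qs, pvSplit c l = q :: qs ∧ qs ≠ [] := by
  induction l with
  | nil => simp at h
  | cons d t ih =>
    by_cases hd : d = c
    · exact ⟨[], pvSplit c t, by simp [pvSplit, hd], pvSplit_ne_nil c t⟩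
    · have hct : c ∈ t := by
        rcases List.mem_cons.mp h with h' | h'
        · exact absurd h'.symm hd
        · exact h'
      obtain ⟨q, qs, hq, hqs⟩ := ih hct
      exact ⟨d :: q, qs, by simp [pvSplit, hd, hq, List.modifyHead], hqs⟩

-- ===== pvMaxLens facts =====
lemma pvMaxLens_foldl (qs : List (List Char)) : ∀ x, qs.foldl (fun a q => max a q.length) x = max x (pvMaxLens qs) := by
  induction qs with
  | nil => intro x; simp [pvMaxLens]
  | cons q t ih =>
    intro x
    simp only [List.foldl_cons, pvMaxLens]
    rw [ih (max x q.length), ih (max 0 q.length)]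
    omega

lemma pvMaxLens_cons (q : List Char) (t : List (List Char)) :
    pvMaxLens (q :: t) = max q.length (pvMaxLens t) := by
  have h1 : pvMaxLens (q :: t) = t.foldl (fun a q => max a q.length) (max 0 q.length) := rfl
  rw [h1, pvMaxLens_foldl t (max 0 q.length)]
  omega

lemma pvMaxLens_append (X Y : List (List Char)) :
    pvMaxLens (X ++ Y) = max (pvMaxLens X) (pvMaxLens Y) := by
  unfold pvMaxLens
  rw [List.foldl_append, pvMaxLens_foldl Y (X.foldl (fun a q => max a q.length) 0)]
  rfl

lemma pvMaxRun_intercalate : ∀ (qs : List (List Char)), qs ≠ [] →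
    (∀ q ∈ qs, ∀ x ∈ q, x = '1') →
    pvMaxRun (List.intercalate ['0'] qs) = pvMaxLens qs := by
  intro qs
  induction qs with
  | nil => intro h; simp at h
  | cons q t ih =>
    intro _ hall
    by_cases ht : t = []
    · subst ht
      simp [List.intercalate]
      have hq : q = List.replicate q.length '1' :=
        List.eq_replicate_of_mem (hall q (by simp))
      conv_lhs => rw [hq, ← List.append_nil (List.replicate q.length '1')]
      rw [pvMaxRun_ones_append q.length (Or.inl rfl)]
      rw [pvMaxLens_cons]
      simp [pvMaxRun_nil, pvMaxLens]
    · rw [pv_ic_cons ['0'] q ht]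
      have hq : q = List.replicate q.length '1' :=
        List.eq_replicate_of_mem (hall q (by simp))
      rw [List.append_assoc]
      conv_lhs => rw [hq]
      rw [pvMaxRun_ones_append q.length (Or.inr ⟨'0', List.intercalate ['0'] t, by simp, by decide⟩)]
      have : pvMaxRun ('0' :: List.intercalate ['0'] t) = pvMaxRun (List.intercalate ['0'] t) :=
        pvMaxRun_cons_ne (by decide) _
      rw [List.singleton_append, this, ih ht (fun r hr => hall r (by simp [hr]))]
      rw [pvMaxLens_cons]

-- cast helper for B's running max over Int lengths
lemma pv_foldl_max_cast (t : List (List Char)) : ∀ (x : Nat),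
    (t.map (fun p => (p.length : Int))).foldl max (x : Int) =
      ((t.foldl (fun a q => max a q.length) x : Nat) : Int) := by
  induction t with
  | nil => intro x; simp
  | cons q s ih =>
    intro x
    simp only [List.map_cons, List.foldl_cons]
    rw [← Nat.cast_max, ih (max x q.length)]

-- floordiv-area formula over Int equals pvF over Nat
lemma pvF_int (m : Nat) :
    PySem.Int.floordiv ((m : Int) + 1) 2 * (((m : Int) + 1) - PySem.Int.floordiv ((m : Int) + 1) 2) = (pvF m : Int) := by
  have h2 : PySem.Int.floordiv ((m : Int) + 1) 2 = (((m + 1) / 2 : Nat) : Int) := by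
    unfold PySem.Int.floordiv
    rw [Int.fdiv_eq_ediv, if_pos (Or.inl (by norm_num))]
    push_cast
    omega
  rw [h2]
  unfold pvF
  have hle : (m + 1) / 2 ≤ m + 1 := Nat.div_le_self _ _
  push_cast [Nat.cast_sub hle]
  ring

-- ===== VERDICT (by name: the statement is the Claim_ definition above) =====
theorem solve_spec : Claim_equal_solve := by
  intro S _dom hpre
  unfold Spec_solve solve solve_alt
  by_cases h0 : PySem.Str.isIn "0" S
  · simp only [h0, Bool.not_true, Bool.false_eq_true, if_false]
    -- '0' ∈ S
    have hmem : '0' ∈ S.toList := by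
      have := (PySem.Str.isIn_iff_infix "0" S).mp h0
      have : ['0'] <:+: S.toList := by simpa using this
      obtain ⟨pre, suf, hps⟩ := this
      rw [← hps]; simp
    have hbin : ∀ c ∈ S.toList, c = '0' ∨ c = '1' := by
      have h := hpre hmem
      simp only [List.all_eq_true, Bool.or_eq_true, beq_iff_eq] at h
      exact h
    -- split structure
    obtain ⟨q1, qs', hsplit, hqs'⟩ := pvSplit_two_of_mem hmem
    obtain ⟨mid, qk, hqs'eq⟩ := (List.eq_nil_or_concat qs').resolve_left hqs'
    rw [List.concat_eq_append] at hqs'eq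
    subst hqs'eq
    set qs : List (List Char) := q1 :: (mid ++ [qk]) with hqs
    have hone : ∀ q ∈ qs, ∀ x ∈ q, x = '1' := by
      intro q hq x hx
      have hsub := pvSplit_mem_sub '0' S.toList q (by rw [hsplit]; exact hq) x hx
      rcases hbin x hsub.1 with h | h
      · exact absurd h hsub.2
      · exact h
    have hic : List.intercalate ['0'] qs = S.toList := by
      rw [← hsplit, pv_intercalate_pvSplit]
    -- A's side: pvLoopA over the doubled list
    have hA : pvLoopA (S.toList ++ S.toList) (S.toList ++ S.toList).length.succ 0 0 =
        pvF (pvMaxRun (S.toList ++ S.toList)) := by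
      rw [pvLoopA_eq (S.toList ++ S.toList) (by intro x hx; exact hbin x (by simp at hx; tauto)) _ 0 0 (by omega)]
      simp
    -- the doubled list as an intercalation
    set qs2 : List (List Char) := (q1 :: mid) ++ ((qk ++ q1) :: (mid ++ [qk])) with hqs2
    have hdouble : S.toList ++ S.toList = List.intercalate ['0'] qs2 := by
      have h1 : List.intercalate ['0'] qs = List.intercalate ['0'] (q1 :: mid) ++ ['0'] ++ qk := by
        rw [hqs, ← List.cons_append]
        rw [pv_ic_append ['0'] (by simp) (by simp : ([qk] : List (List Char)) ≠ [])]
        simp [List.intercalate]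
      have h2 : List.intercalate ['0'] qs = q1 ++ ['0'] ++ List.intercalate ['0'] (mid ++ [qk]) := by
        rw [hqs, pv_ic_cons ['0'] q1 (by simp)]
      have hqs2e : ['0'].intercalate qs2 =
          ['0'].intercalate (q1 :: mid) ++ ['0'] ++ ((qk ++ q1) ++ ['0'] ++ ['0'].intercalate (mid ++ [qk])) := by
        rw [hqs2, pv_ic_append ['0'] (show q1 :: mid ≠ [] by simp)
              (show ((qk ++ q1) :: (mid ++ [qk])) ≠ [] by simp),
            pv_ic_cons ['0'] (qk ++ q1) (show mid ++ [qk] ≠ [] by simp)]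
      conv_lhs => rw [← hic]
      nth_rewrite 1 [h1]
      rw [h2, hqs2e]
      simp [List.append_assoc]
    -- max-run of the doubled list
    have hone2 : ∀ q ∈ qs2, ∀ x ∈ q, x = '1' := by
      intro q hq x hx
      rw [hqs2] at hq
      simp at hq
      rcases hq with hq | hq | hq | hq
      · exact hone q (by simp [hqs, hq]) x hx
      · exact hone q (by simp [hqs, hq]) x hx
      · subst hq
        rcases List.mem_append.mp hx with hx' | hx'
        · exact hone qk (by simp [hqs]) x hx'
        · exact hone q1 (by simp [hqs]) x hx'
      · exact hone q (by simp [hqs, hq]) x hx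
    have hMR2 : pvMaxRun (S.toList ++ S.toList) = pvMaxLens qs2 := by
      rw [hdouble, pvMaxRun_intercalate qs2 (by simp [hqs2]) hone2]
    -- arithmetic on max-lens
    have hML : pvMaxLens qs2 = max (pvMaxLens qs) (q1.length + qk.length) := by
      have h3 : pvMaxLens [qk] = qk.length := by
        rw [pvMaxLens_cons]
        simp [pvMaxLens]
      have e1 : pvMaxLens qs2 = max (pvMaxLens (q1 :: mid)) (pvMaxLens ((qk ++ q1) :: (mid ++ [qk]))) := by
        rw [hqs2, pvMaxLens_append]
      have e2 : pvMaxLens (q1 :: mid) = max q1.length (pvMaxLens mid) := pvMaxLens_cons _ _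
      have e3 : pvMaxLens ((qk ++ q1) :: (mid ++ [qk])) = max (qk ++ q1).length (max (pvMaxLens mid) qk.length) := by
        rw [pvMaxLens_cons, pvMaxLens_append, h3]
      have e4 : pvMaxLens qs = max q1.length (max (pvMaxLens mid) qk.length) := by
        rw [hqs, pvMaxLens_cons, pvMaxLens_append, h3]
      rw [List.length_append] at e3
      omega
    -- B's side computation
    set runs : List Int := (PySem.Chars.splitOn S.toList "0".toList).map (fun p => (p.length : Int)) with hruns
    have hruns' : runs = ((q1.length : Int)) :: (mid ++ [qk]).map (fun p => (p.length : Int)) := by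
      rw [hruns]
      have : "0".toList = ['0'] := rfl
      rw [this, pv_splitOn_eq, hsplit, hqs]
      simp
    have hm : (match PySem.List.max? runs (fun x => x) with | some m => m | none => 0) = ((pvMaxLens qs : Nat) : Int) := by
      rw [hruns', PySem.List.max?_id_cons]
      rw [pv_foldl_max_cast (mid ++ [qk]) q1.length]
      rw [hqs, pvMaxLens_cons]
      rw [pvMaxLens_foldl (mid ++ [qk]) q1.length]
    have hlenruns : runs.length = mid.length + 2 := by
      rw [hruns']; simp
    have hget0 : PySem.List.pyGetD runs 0 0 = (q1.length : Int) := by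
      have := PySem.List.pyGetD_natCast runs 0 0
      simpa [hruns'] using this
    have hgetlast : PySem.List.pyGetD runs (-1) 0 = (qk.length : Int) := by
      rw [hruns', PySem.List.pyGetD_neg_ofNat _ 1 0 (by omega) (by simp)]
      simp
    rw [hA, hMR2, hML, hm, hget0, hgetlast]
    have hcast : max ((pvMaxLens qs : Nat) : Int) ((q1.length : Int) + (qk.length : Int)) =
        ((max (pvMaxLens qs) (q1.length + qk.length) : Nat) : Int) := by
      push_cast; omega
    rw [hcast, pvF_int]
  · have h0' : PySem.Chars.isIn ['0'] S.toList = false := by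
      have : PySem.Str.isIn "0" S = PySem.Chars.isIn ['0'] S.toList := rfl
      rw [this] at h0
      exact Bool.not_eq_true _ ▸ (by simpa using h0)
    simp [h0', pow_two, PySem.Str.len]
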